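-- pv_equiv track=rewrite | github.com/smeas/Advent-of-Code-2023 | 12/solution.py | decode_pattern
-- ===== SOURCE A (Python) =====
-- def decode_pattern(pattern):
-- 	group_count = 0
-- 	values = []
-- 	for chr in pattern:
-- 		match chr:
-- 			case "#":
-- 				group_count += 1
-- 			case ".":
-- 				if group_count > 0:
-- 					values.append(group_count)
-- 					group_count = 0
--
-- 	if group_count > 0:
-- 		values.append(group_count)
-- 	return values
-- ===== SOURCE B (Python) =====
-- def decode_pattern(pattern):
-- 	return [seg.count("#") for seg in pattern.split(".") if seg.count("#") > 0]
-- ===== Notes on version B (the rewrite author's own statement) =====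
-- stated objective: faster
-- what changed: Replaces A's per-character counter state machine with a split-on-dot then a comprehension taking each segment's hash-count, keeping positive counts.
import Mathlib
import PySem

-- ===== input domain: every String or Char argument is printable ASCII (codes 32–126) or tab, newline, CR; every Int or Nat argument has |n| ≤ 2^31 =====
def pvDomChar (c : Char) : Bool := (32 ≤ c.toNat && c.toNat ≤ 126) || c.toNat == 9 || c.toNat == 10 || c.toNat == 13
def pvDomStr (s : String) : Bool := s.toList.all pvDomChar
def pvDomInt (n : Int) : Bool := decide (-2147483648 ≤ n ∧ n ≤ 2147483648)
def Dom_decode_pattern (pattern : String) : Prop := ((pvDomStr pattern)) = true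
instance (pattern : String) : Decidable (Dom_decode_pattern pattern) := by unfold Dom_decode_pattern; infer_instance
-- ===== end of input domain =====

-- B replaces A's per-character counter state machine with split-on-dot then per-segment hash-counts (same O(n); measured faster via C-level str.split/str.count).

-- ===== PORT A =====
-- the loop body: '#' increments the open group, '.' flushes it if positive, anything else is ignored
def decodeStepA (st : Int × List Int) (c : Char) : Int × List Int :=
  if c = '#' then (st.1 + 1, st.2)
  else if c = '.' then (if st.1 > 0 then (0, st.2 ++ [st.1]) else st)
  else st

def decode_pattern (pattern : String) : List Int :=
  let r := pattern.toList.foldl decodeStepA (0, [])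
  if r.1 > 0 then r.2 ++ [r.1] else r.2

-- ===== PORT B =====
-- [seg.count("#") for seg in pattern.split(".") if seg.count("#") > 0]
def decode_pattern_alt (pattern : String) : List Int :=
  ((PySem.Chars.splitOn pattern.toList ['.']).filter
      (fun seg => decide (0 < PySem.Chars.count seg ['#']))).map
    (fun seg => (PySem.Chars.count seg ['#'] : Int))

-- ===== PRECONDITION & SPEC =====
def Spec_decode_pattern (pattern : String) (out : List Int) : Prop := out = decode_pattern_alt pattern
instance (pattern : String) (out : List Int) : Decidable (Spec_decode_pattern pattern out) := by unfold Spec_decode_pattern; infer_instance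

-- ===== CLAIM (what is proved, stated in full; the proofs are below) =====
def Claim_equal_decode_pattern : Prop := ∀ (pattern : String), Dom_decode_pattern pattern → Spec_decode_pattern pattern (decode_pattern pattern)

-- ===== LEMMAS AND PROOFS =====

-- 'F' = what B does to a list of segments
def segF (segs : List (List Char)) : List Int :=
  (segs.filter (fun seg => decide (0 < PySem.Chars.count seg ['#']))).map
    (fun seg => (PySem.Chars.count seg ['#'] : Int))

theorem segF_append (a b : List (List Char)) : segF (a ++ b) = segF a ++ segF b := by
  simp [segF]

theorem count_go_hash (l : List Char) (fuel acc : Nat) (h : l.length ≤ fuel) :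
    PySem.Chars.count.go ['#'] fuel l acc = acc + l.count '#' := by
  induction fuel generalizing l acc with
  | zero =>
    interval_cases hl : l.length
    · simp at hl; subst hl; simp [PySem.Chars.count.go]
  | succ f ih =>
    cases l with
    | nil => simp [PySem.Chars.count.go]
    | cons c rest =>
      rw [List.length_cons] at h
      rw [PySem.Chars.count.go]
      simp only [List.isPrefixOf, Bool.and_true]
      by_cases hc : c = '#'
      · subst hc
        simp only [beq_self_eq_true, if_true, List.length_cons, List.length_nil,
          List.drop_succ_cons, List.drop_zero]
        rw [ih rest (acc + 1) (by omega)]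
        simp [List.count_cons]
        omega
      · have hb : ('#' == c) = false := beq_eq_false_iff_ne.mpr (fun h' => hc h'.symm)
        simp only [hb, Bool.false_eq_true, if_false]
        rw [ih rest acc (by omega)]
        simp [List.count_cons, hc]

theorem count_hash (l : List Char) : PySem.Chars.count l ['#'] = l.count '#' := by
  rw [PySem.Chars.count]
  simp only [List.isEmpty_cons, if_neg, Bool.false_eq_true, not_false_iff]
  simpa using count_go_hash l l.length 0 le_rfl

theorem splitGo_nil (fuel : Nat) (cur : List Char) (acc : List (List Char)) :
    PySem.Chars.splitOn.go ['.'] fuel [] cur acc = (cur.reverse :: acc).reverse := by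
  cases fuel <;> simp [PySem.Chars.splitOn.go]

theorem splitGo_cons (fuel : Nat) (c : Char) (rest cur : List Char) (acc : List (List Char)) :
    PySem.Chars.splitOn.go ['.'] (fuel + 1) (c :: rest) cur acc =
      if c = '.' then PySem.Chars.splitOn.go ['.'] fuel rest [] (cur.reverse :: acc)
      else PySem.Chars.splitOn.go ['.'] fuel rest (c :: cur) acc := by
  rw [PySem.Chars.splitOn.go]
  simp only [List.isPrefixOf, Bool.and_true]
  by_cases hc : c = '.'
  · subst hc; simp
  · have hb : ('.' == c) = false := beq_eq_false_iff_ne.mpr (fun h' => hc h'.symm)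
    simp [hb, hc]

theorem splitGo_acc (fuel : Nat) (l cur : List Char) (acc : List (List Char)) :
    PySem.Chars.splitOn.go ['.'] fuel l cur acc =
      acc.reverse ++ PySem.Chars.splitOn.go ['.'] fuel l cur [] := by
  induction fuel generalizing l cur acc with
  | zero => simp [PySem.Chars.splitOn.go]
  | succ f ih =>
    cases l with
    | nil => rw [splitGo_nil, splitGo_nil]; simp
    | cons c rest =>
      rw [splitGo_cons, splitGo_cons]
      by_cases hc : c = '.'
      · simp only [hc, if_pos]
        rw [ih rest [] (cur.reverse :: acc), ih rest [] [cur.reverse]]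
        simp
      · simp only [hc, if_neg, not_false_iff]
        exact ih rest (c :: cur) acc

-- main invariant: A's loop from state (count of '#' in the open segment, vs) equals vs ++ B on the remaining split
theorem main_inv (l : List Char) (fuel : Nat) (h : l.length ≤ fuel) (cur : List Char) (vs : List Int) :
    (let r := l.foldl decodeStepA ((cur.count '#' : Int), vs);
     if r.1 > 0 then r.2 ++ [r.1] else r.2) =
      vs ++ segF (PySem.Chars.splitOn.go ['.'] fuel l cur []) := by
  induction l generalizing fuel cur vs with
  | nil =>
    rw [splitGo_nil]
    simp only [List.foldl_nil, List.reverse_cons, List.reverse_nil, List.nil_append]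
    simp only [segF, count_hash, List.count_reverse]
    by_cases hc : 0 < cur.count '#'
    · simp [hc, List.filter, Nat.cast_pos.mpr hc]
    · have h0 : cur.count '#' = 0 := by omega
      simp [h0, List.filter]
  | cons c rest ih =>
    cases fuel with
    | zero => simp at h
    | succ f =>
      rw [splitGo_cons]
      rw [List.length_cons] at h
      by_cases hc : c = '.'
      · subst hc
        simp only [if_pos]
        rw [splitGo_acc, segF_append]
        simp only [List.reverse_cons, List.reverse_nil, List.nil_append]
        have step : decodeStepA ((cur.count '#' : Int), vs) '.' =
            ((0 : Int), vs ++ segF [cur.reverse]) := by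
          simp only [decodeStepA, reduceCtorEq, if_false]
          simp only [segF, count_hash, List.count_reverse, List.filter]
          by_cases hp : 0 < cur.count '#'
          · simp [Nat.cast_pos.mpr hp, hp]
          · have h0 : cur.count '#' = 0 := by omega
            simp [h0]
        rw [List.foldl_cons, step]
        have := ih f (by omega) [] (vs ++ segF [cur.reverse])
        simp only [List.count_nil, Nat.cast_zero] at this
        rw [this, List.append_assoc]
      · have step : decodeStepA ((cur.count '#' : Int), vs) c =
            (((c :: cur).count '#' : Int), vs) := by
          by_cases hh : c = '#'
          · subst hh; simp [decodeStepA, List.count_cons]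
          · simp [decodeStepA, hh, hc, List.count_cons]
        simp only [hc, if_neg, not_false_iff, List.foldl_cons, step]
        exact ih f (by omega) (c :: cur) vs

-- ===== VERDICT (by name: the statement is the Claim_ definition above) =====
theorem decode_pattern_spec : Claim_equal_decode_pattern := by
  intro pattern _
  show decode_pattern pattern = decode_pattern_alt pattern
  rw [decode_pattern, decode_pattern_alt, PySem.Chars.splitOn]
  have := main_inv pattern.toList (pattern.toList.length + 1) (by omega) [] []
  simp only [List.count_nil, Nat.cast_zero, List.nil_append] at this
  exact this
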